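-- pv_equiv track=rewrite | github.com/harunardi/cockatoo-dev | SRC/XSPROCESS_3D_HEXX.py | convert_3D_hexx
-- ===== SOURCE A (Python) =====
-- def convert_3D_hexx(K_max, J_max, I_max, D):
--     conv_hexx = [0] * (K_max * J_max * I_max)
--     tmp_conv = 0
--     for k in range(K_max):
--         for j in range(J_max):
--             for i in range(I_max):
--                 if D[0][k][j][i] != 0:
--                     tmp_conv += 1
--                     m = k * J_max * I_max + j * I_max + i
--                     conv_hexx[m] = tmp_conv
--
--     return conv_hexx
-- ===== SOURCE B (Python) =====
-- def convert_3D_hexx(K_max, J_max, I_max, D):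
--     # Flatten the nonzero mask of D[0] in k,j,i order, then compute its running
--     # prefix sums: the value at a nonzero cell is exactly the count of nonzero
--     # cells up to and including it, so the answer is the prefix sum masked by
--     # the flag.  No linear index k*J*I + j*I + i and no scattered writes.
--     flags = [1 if D[0][k][j][i] != 0 else 0
--              for k in range(K_max)
--              for j in range(J_max)
--              for i in range(I_max)]
--     prefix = []
--     s = 0
--     for f in flags:
--         s += f
--         prefix.append(s)
--     return [p if f else 0 for f, p in zip(flags, prefix)]
-- ===== Notes on version B (the rewrite author's own statement) =====
-- stated objective: alternative
-- what changed: A fuses a counter with conditional scattered writes conv[k*J*I+j*I+i]=count into a preallocated array; B never computes a linear index or scatters: it flattens the nonzero mask, takes its running prefix sums, and builds the output positionally as the prefix count masked by the flag.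
-- outside the precondition, e.g. on convert_3D_hexx(-1, -1, 2, [[[[1]]]]): A returns [0, 0], B returns []
import Mathlib
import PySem

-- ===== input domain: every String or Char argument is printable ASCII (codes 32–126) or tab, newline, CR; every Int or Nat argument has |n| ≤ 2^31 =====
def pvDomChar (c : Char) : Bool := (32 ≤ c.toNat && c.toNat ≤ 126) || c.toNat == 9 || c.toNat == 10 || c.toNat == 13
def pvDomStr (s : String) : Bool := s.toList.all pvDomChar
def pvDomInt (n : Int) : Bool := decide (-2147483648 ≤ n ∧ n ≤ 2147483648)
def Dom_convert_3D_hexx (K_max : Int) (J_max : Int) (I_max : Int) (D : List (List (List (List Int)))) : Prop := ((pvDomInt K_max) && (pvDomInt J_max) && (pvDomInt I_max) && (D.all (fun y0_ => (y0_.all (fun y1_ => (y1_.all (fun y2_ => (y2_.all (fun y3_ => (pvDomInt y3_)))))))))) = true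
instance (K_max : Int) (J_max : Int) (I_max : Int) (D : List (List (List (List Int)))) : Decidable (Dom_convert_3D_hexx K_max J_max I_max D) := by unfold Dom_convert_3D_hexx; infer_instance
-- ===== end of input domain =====

-- B replaces A's counter-plus-scattered-writes loop by a flattened nonzero mask,
-- its running prefix sums, and a positional mask — no linear index, no scatter (alternative, same cost).

-- shared indexing helper: D[0][k][j][i] (the default is unreachable under Pre_)
def dAt (D : List (List (List (List Int)))) (k j i : Int) : Int :=
  PySem.List.pyGetD (PySem.List.pyGetD (PySem.List.pyGetD (PySem.List.pyGetD D 0 []) k []) j []) i 0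

-- ===== PORT A =====
def convert_3D_hexx (K_max : Int) (J_max : Int) (I_max : Int) (D : List (List (List (List Int)))) : List Int :=
  let conv0 : List Int := List.replicate (K_max * J_max * I_max).toNat 0
  ((PySem.List.pyRange 0 K_max 1).foldl (fun st k =>
    (PySem.List.pyRange 0 J_max 1).foldl (fun st j =>
      (PySem.List.pyRange 0 I_max 1).foldl (fun st i =>
        if dAt D k j i ≠ 0 then
          (st.1.set (k * J_max * I_max + j * I_max + i).toNat (st.2 + 1), st.2 + 1)
        else st) st) st) (conv0, (0 : Int))).1

-- ===== PORT B =====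
-- B's prefix loop 'for f in flags: s += f; prefix.append(s)' as structural recursion
-- over the same running sum s (each append emits one element)
def pfxRun : List Int → Int → List Int
  | [], _ => []
  | f :: fs, s => (s + f) :: pfxRun fs (s + f)

def convert_3D_hexx_alt (K_max : Int) (J_max : Int) (I_max : Int) (D : List (List (List (List Int)))) : List Int :=
  let flags : List Int :=
    (PySem.List.pyRange 0 K_max 1).flatMap (fun k =>
      (PySem.List.pyRange 0 J_max 1).flatMap (fun j =>
        (PySem.List.pyRange 0 I_max 1).map (fun i => if dAt D k j i != 0 then (1 : Int) else 0)))
  let pfx : List Int := pfxRun flags 0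
  (flags.zip pfx).map (fun p => if p.1 != 0 then p.2 else 0)

-- ===== PRECONDITION & SPEC =====
-- Pre_ excludes (a) the inputs where Python A raises IndexError (when all three bounds
-- are positive the body reads D[0][k][j][i], so D must be nonempty and the touched part
-- of D[0] large enough), and (b) the corner with a negative bound but positive product
-- K_max*J_max*I_max, where A's nonempty all-zero result is an artefact of its
-- preallocation [0]*(K*J*I) while B naturally returns the empty flattened list.
def Pre_convert_3D_hexx (K_max : Int) (J_max : Int) (I_max : Int) (D : List (List (List (List Int)))) : Prop :=
  (0 < K_max * J_max * I_max → 0 ≤ K_max ∧ 0 ≤ J_max ∧ 0 ≤ I_max) ∧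
  ((0 < K_max ∧ 0 < J_max ∧ 0 < I_max) →
    (D ≠ [] ∧ K_max ≤ (D.headI.length : Int) ∧
      ∀ p ∈ D.headI.take K_max.toNat, J_max ≤ (p.length : Int) ∧
        ∀ r ∈ p.take J_max.toNat, I_max ≤ (r.length : Int)))
instance (K_max : Int) (J_max : Int) (I_max : Int) (D : List (List (List (List Int)))) : Decidable (Pre_convert_3D_hexx K_max J_max I_max D) := by unfold Pre_convert_3D_hexx; infer_instance

def pvWitness_convert_3D_hexx : Int × Int × Int × List (List (List (List Int))) := (1, 1, 2, [[[[5, 0]]]])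

def Spec_convert_3D_hexx (K_max : Int) (J_max : Int) (I_max : Int) (D : List (List (List (List Int)))) (out : List Int) : Prop := out = convert_3D_hexx_alt K_max J_max I_max D
instance (K_max : Int) (J_max : Int) (I_max : Int) (D : List (List (List (List Int)))) (out : List Int) : Decidable (Spec_convert_3D_hexx K_max J_max I_max D out) := by unfold Spec_convert_3D_hexx; infer_instance

-- ===== CLAIM (what is proved, stated in full; the proofs are below) =====
def Claim_equal_convert_3D_hexx : Prop := ∀ (K_max : Int) (J_max : Int) (I_max : Int) (D : List (List (List (List Int)))), Dom_convert_3D_hexx K_max J_max I_max D → Pre_convert_3D_hexx K_max J_max I_max D → Spec_convert_3D_hexx K_max J_max I_max D (convert_3D_hexx K_max J_max I_max D)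

-- ===== LEMMAS AND PROOFS =====

-- A's step on a flattened (k,j,i) triple
def fstep (J_max I_max : Int) (D : List (List (List (List Int)))) (st : List Int × Int) (t : Int × Int × Int) : List Int × Int :=
  if dAt D t.1 t.2.1 t.2.2 ≠ 0 then
    (st.1.set (t.1 * J_max * I_max + t.2.1 * I_max + t.2.2).toNat (st.2 + 1), st.2 + 1)
  else st

-- linear positions of the surviving triples
def pos (J_max I_max : Int) (D : List (List (List (List Int)))) (ts : List (Int × Int × Int)) : List Int :=
  ts.filterMap (fun t => if dAt D t.1 t.2.1 t.2.2 ≠ 0 then some (t.1 * J_max * I_max + t.2.1 * I_max + t.2.2) else none)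

-- scatter successive numbers starting at n
def scat : List Int → List Int → Int → List Int
  | l, [], _ => l
  | l, m :: ms, n => scat (l.set m.toNat n) ms (n + 1)

-- sequential numbering of a triple list by its nonzero flag (the common normal form)
def numbT (J_max I_max : Int) (D : List (List (List (List Int)))) : List (Int × Int × Int) → Int → List Int
  | [], _ => []
  | t :: ts, c =>
    if dAt D t.1 t.2.1 t.2.2 ≠ 0 then (c + 1) :: numbT J_max I_max D ts (c + 1)
    else 0 :: numbT J_max I_max D ts c

-- the flattened triple list of the nested loops
def tsOf (K_max J_max I_max : Int) : List (Int × Int × Int) :=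
  (PySem.List.pyRange 0 K_max 1).flatMap (fun k =>
    (PySem.List.pyRange 0 J_max 1).flatMap (fun j =>
      (PySem.List.pyRange 0 I_max 1).map (fun i => (k, j, i))))

theorem foldl_fstep_eq_scat (J_max I_max : Int) (D : List (List (List (List Int))))
    (ts : List (Int × Int × Int)) : ∀ (l : List Int) (t : Int),
    ts.foldl (fstep J_max I_max D) (l, t)
      = (scat l (pos J_max I_max D ts) (t + 1), t + (pos J_max I_max D ts).length) := by
  induction ts with
  | nil => intro l t; simp [pos, scat]
  | cons a ts ih =>
    intro l t
    by_cases h : dAt D a.1 a.2.1 a.2.2 ≠ 0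
    · have hc : fstep J_max I_max D (l, t) a
          = (l.set (a.1 * J_max * I_max + a.2.1 * I_max + a.2.2).toNat (t + 1), t + 1) := by
        simp [fstep, if_pos h]
      have hp : pos J_max I_max D (a :: ts)
          = (a.1 * J_max * I_max + a.2.1 * I_max + a.2.2) :: pos J_max I_max D ts := by
        simp only [pos, List.filterMap_cons, if_pos h]
      rw [List.foldl_cons, hc, ih, hp]
      simp only [scat, List.length_cons, Prod.mk.injEq]
      exact ⟨trivial, by push_cast; ring⟩
    · have hc : fstep J_max I_max D (l, t) a = (l, t) := by simp [fstep, if_neg h]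
      have hp : pos J_max I_max D (a :: ts) = pos J_max I_max D ts := by
        simp only [pos, List.filterMap_cons, if_neg h]
      rw [List.foldl_cons, hc, hp]
      exact ih l t

theorem set_append_length (pre : List Int) (x : Int) (rest : List Int) (v : Int) :
    (pre ++ x :: rest).set pre.length v = pre ++ v :: rest := by
  induction pre with
  | nil => rfl
  | cons a pre ih => simp [ih]

-- scatter at consecutive positions = sequential numbering
theorem scat_eq_numbT (J_max I_max : Int) (D : List (List (List (List Int)))) :
    ∀ (ts : List (Int × Int × Int)) (pre : List Int) (c : Int),
    ts.map (fun t => t.1 * J_max * I_max + t.2.1 * I_max + t.2.2)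
      = (List.range' pre.length ts.length).map (Int.ofNat) →
    scat (pre ++ List.replicate ts.length 0) (pos J_max I_max D ts) (c + 1)
      = pre ++ numbT J_max I_max D ts c := by
  intro ts
  induction ts with
  | nil => intro pre c _; simp [pos, scat, numbT]
  | cons t ts ih =>
    intro pre c h
    rw [List.length_cons, List.range'_succ, List.map_cons, List.map_cons] at h
    have hm : t.1 * J_max * I_max + t.2.1 * I_max + t.2.2 = (pre.length : Int) := (List.cons.injEq _ _ _ _ ▸ h).1
    have hts : ts.map (fun t => t.1 * J_max * I_max + t.2.1 * I_max + t.2.2)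
        = (List.range' (pre.length + 1) ts.length).map (Int.ofNat) := (List.cons.injEq _ _ _ _ ▸ h).2
    by_cases hf : dAt D t.1 t.2.1 t.2.2 ≠ 0
    · have hp : pos J_max I_max D (t :: ts)
          = (t.1 * J_max * I_max + t.2.1 * I_max + t.2.2) :: pos J_max I_max D ts := by
        simp only [pos, List.filterMap_cons, if_pos hf]
      rw [hp, List.length_cons, List.replicate_succ, scat, hm]
      have hset : (pre ++ (0 : Int) :: List.replicate ts.length 0).set ((pre.length : Int)).toNat (c + 1)
          = (pre ++ [c + 1]) ++ List.replicate ts.length 0 := by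
        rw [Int.toNat_natCast, set_append_length]; simp
      rw [hset, ih (pre ++ [c + 1]) (c + 1) (by simpa using hts)]
      simp [numbT, if_pos hf]
    · have hp : pos J_max I_max D (t :: ts) = pos J_max I_max D ts := by
        simp only [pos, List.filterMap_cons, if_neg hf]
      rw [hp, List.length_cons, List.replicate_succ]
      have : pre ++ (0 : Int) :: List.replicate ts.length 0 = (pre ++ [0]) ++ List.replicate ts.length 0 := by simp
      rw [this, ih (pre ++ [0]) c (by simpa using hts)]
      simp [numbT, if_neg hf]

-- B's zip-and-mask over the flag list = sequential numbering
theorem zip_pfx_eq_numbT (J_max I_max : Int) (D : List (List (List (List Int)))) :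
    ∀ (ts : List (Int × Int × Int)) (c : Int),
    ((ts.map (fun t => if dAt D t.1 t.2.1 t.2.2 ≠ 0 then (1 : Int) else 0)).zip
      (pfxRun (ts.map (fun t => if dAt D t.1 t.2.1 t.2.2 ≠ 0 then (1 : Int) else 0)) c)).map
        (fun p => if p.1 != 0 then p.2 else 0)
      = numbT J_max I_max D ts c := by
  intro ts
  induction ts with
  | nil => intro c; simp [numbT]
  | cons t ts ih =>
    intro c
    by_cases hf : dAt D t.1 t.2.1 t.2.2 ≠ 0
    · simp only [List.map_cons, if_pos hf, pfxRun, List.zip_cons_cons, numbT]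
      rw [ih (c + 1)]
      norm_num
    · simp only [List.map_cons, if_neg hf, pfxRun, List.zip_cons_cons, numbT]
      rw [add_zero, ih c]
      norm_num

-- Nat range product: flattening two nested ranges by j*c + i gives one range
theorem range_flatMap_mul (b c : ℕ) :
    (List.range b).flatMap (fun j => (List.range c).map (fun i => j * c + i)) = List.range (b * c) := by
  induction b with
  | zero => simp
  | succ b ih =>
    rw [List.range_succ, List.flatMap_append, ih, Nat.succ_mul, List.range_add]
    simp

theorem range_flatMap_mul3 (b c d : ℕ) :
    (List.range b).flatMap (fun k => (List.range c).flatMap (fun j =>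
      (List.range d).map (fun i => k * (c * d) + (j * d + i)))) = List.range (b * (c * d)) := by
  have h1 : ∀ k : ℕ, (List.range c).flatMap (fun j => (List.range d).map (fun i => k * (c * d) + (j * d + i)))
      = (List.range (c * d)).map (fun m => k * (c * d) + m) := by
    intro k
    rw [← range_flatMap_mul c d, List.map_flatMap]
    refine List.flatMap_congr ?_
    intro j _
    rw [List.map_map]
    rfl
  calc (List.range b).flatMap (fun k => (List.range c).flatMap (fun j =>
          (List.range d).map (fun i => k * (c * d) + (j * d + i))))
      = (List.range b).flatMap (fun k => (List.range (c * d)).map (fun m => k * (c * d) + m)) := by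
        exact List.flatMap_congr (fun k _ => h1 k)
    _ = List.range (b * (c * d)) := range_flatMap_mul b (c * d)

theorem foldl_flatMap' {α β σ : Type} (l : List α) (f : α → List β) (g : σ → β → σ) :
    ∀ (b : σ), (l.flatMap f).foldl g b = l.foldl (fun b a => (f a).foldl g b) b := by
  induction l with
  | nil => intro b; simp
  | cons a l ih => intro b; simp [List.flatMap_cons, List.foldl_append, ih]

theorem foldl_fun_congr {α σ : Type} (l : List α) (f g : σ → α → σ)
    (h : ∀ s a, a ∈ l → f s a = g s a) : ∀ s, l.foldl f s = l.foldl g s := by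
  induction l with
  | nil => intro s; rfl
  | cons a l ih =>
    intro s
    simp only [List.foldl_cons]
    rw [h s a (by simp), ih (fun s b hb => h s b (by simp [hb]))]

-- A's nested fold, flattened over tsOf
theorem convA_eq_fold_tsOf (K_max J_max I_max : Int) (D : List (List (List (List Int)))) :
    convert_3D_hexx K_max J_max I_max D
      = ((tsOf K_max J_max I_max).foldl (fstep J_max I_max D)
          (List.replicate (K_max * J_max * I_max).toNat 0, (0 : Int))).1 := by
  unfold convert_3D_hexx tsOf
  dsimp only
  congr 1
  rw [foldl_flatMap']
  apply foldl_fun_congr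
  intro st k _
  rw [foldl_flatMap']
  apply foldl_fun_congr
  intro st j _
  rw [List.foldl_map]
  rfl

-- B equals the sequential numbering of tsOf
theorem convB_eq_numbT (K_max J_max I_max : Int) (D : List (List (List (List Int)))) :
    convert_3D_hexx_alt K_max J_max I_max D = numbT J_max I_max D (tsOf K_max J_max I_max) 0 := by
  unfold convert_3D_hexx_alt
  have hflags : ((PySem.List.pyRange 0 K_max 1).flatMap (fun k =>
      (PySem.List.pyRange 0 J_max 1).flatMap (fun j =>
        (PySem.List.pyRange 0 I_max 1).map (fun i => if dAt D k j i != 0 then (1 : Int) else 0))))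
      = (tsOf K_max J_max I_max).map (fun t => if dAt D t.1 t.2.1 t.2.2 ≠ 0 then (1 : Int) else 0) := by
    unfold tsOf
    rw [List.map_flatMap]
    refine List.flatMap_congr ?_
    intro k _
    rw [List.map_flatMap]
    refine List.flatMap_congr ?_
    intro j _
    rw [List.map_map]
    refine List.map_congr_left ?_
    intro i _
    simp [bne_iff_ne]
  dsimp only
  rw [hflags, zip_pfx_eq_numbT]

-- under positive bounds, the linear indices of tsOf are exactly 0,1,2,…
theorem pyR0 (n : Int) : PySem.List.pyRange 0 n 1 = (List.range n.toNat).map (fun k : ℕ => (k : Int)) := by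
  exact PySem.List.pyRange_zero n

theorem tsOf_mval (K_max J_max I_max : Int) (hK : 0 < K_max) (hJ : 0 < J_max) (hI : 0 < I_max) :
    (tsOf K_max J_max I_max).map (fun t => t.1 * J_max * I_max + t.2.1 * I_max + t.2.2)
      = (List.range (K_max.toNat * (J_max.toNat * I_max.toNat))).map (Int.ofNat) := by
  have hJ' : ((J_max.toNat : ℕ) : Int) = J_max := Int.toNat_of_nonneg hJ.le
  have hI' : ((I_max.toNat : ℕ) : Int) = I_max := Int.toNat_of_nonneg hI.le
  unfold tsOf
  rw [pyR0, pyR0, pyR0]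
  rw [List.map_flatMap, List.flatMap_map]
  rw [← range_flatMap_mul3 K_max.toNat J_max.toNat I_max.toNat, List.map_flatMap]
  refine List.flatMap_congr ?_
  intro k _
  rw [List.map_flatMap, List.flatMap_map, List.map_flatMap]
  refine List.flatMap_congr ?_
  intro j _
  rw [List.map_map, List.map_map, List.map_map]
  refine List.map_congr_left ?_
  intro i _
  simp only [Function.comp_apply, Int.ofNat_eq_natCast]
  push_cast [hJ', hI']
  ring

theorem convert_3D_hexx_spec : Claim_equal_convert_3D_hexx := by
  intro K_max J_max I_max D _ hPre
  unfold Spec_convert_3D_hexx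
  rw [convA_eq_fold_tsOf, convB_eq_numbT]
  by_cases hpos : 0 < K_max ∧ 0 < J_max ∧ 0 < I_max
  · obtain ⟨hK, hJ, hI⟩ := hpos
    have hmv := tsOf_mval K_max J_max I_max hK hJ hI
    have hlen : (tsOf K_max J_max I_max).length = K_max.toNat * (J_max.toNat * I_max.toNat) := by
      have := congrArg List.length hmv
      simpa using this
    have hprod : (K_max * J_max * I_max).toNat = (tsOf K_max J_max I_max).length := by
      rw [hlen]
      have h2 : K_max * J_max * I_max = ((K_max.toNat * (J_max.toNat * I_max.toNat) : ℕ) : Int) := by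
        push_cast [Int.toNat_of_nonneg hK.le, Int.toNat_of_nonneg hJ.le, Int.toNat_of_nonneg hI.le]
        ring
      rw [h2, Int.toNat_natCast]
    rw [hprod, foldl_fstep_eq_scat]
    have := scat_eq_numbT J_max I_max D (tsOf K_max J_max I_max) [] 0
      (by rw [List.length_nil, ← List.range_eq_range', hlen]; exact hmv)
    simpa using this
  · -- some bound is nonpositive: both sides are []
    have hts : tsOf K_max J_max I_max = [] := by
      unfold tsOf
      rcases not_and_or.mp hpos with hK | hJI
      · rw [PySem.List.pyRange_one_eq_nil (show K_max ≤ 0 by omega)]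
        rfl
      · rcases not_and_or.mp hJI with hJ | hI
        · simp [PySem.List.pyRange_one_eq_nil (show J_max ≤ 0 by omega)]
        · simp [PySem.List.pyRange_one_eq_nil (show I_max ≤ 0 by omega)]
    have hprod : (K_max * J_max * I_max).toNat = 0 := by
      rcases lt_trichotomy (K_max * J_max * I_max) 0 with h | h | h
      · exact Int.toNat_of_nonpos h.le
      · rw [h]; rfl
      · exfalso
        obtain ⟨hK0, hJ0, hI0⟩ := hPre.1 h
        rcases not_and_or.mp hpos with hK | hJI
        · have hz : K_max = 0 := by omega
          rw [hz] at h; simp at h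
        · rcases not_and_or.mp hJI with hJ | hI
          · have hz : J_max = 0 := by omega
            rw [hz] at h; simp at h
          · have hz : I_max = 0 := by omega
            rw [hz] at h; simp at h
    rw [hts, hprod]
    simp [numbT]
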